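-- pv_equiv track=rewrite | github.com/stephen-huan/lectures | tjhsst/sct/range-minimum-query/code/rmq.py | full_table
-- ===== SOURCE A (Python) =====
-- def full_table(l: list) -> list:
--     """ Computes all possible ranges. """
--     n = len(l)
--     dp = [[] for i in range(n)]
--
--     for i in range(n):
--         dp[i].append(i)
--
--     for j in range(n):
--         for i in range(n - 1):
--             if i + j >= n or j >= len(dp[i + 1]):
--                 break
--             dp[i].append(min(dp[i][j], dp[i + 1][j], key=lambda x: l[x]))
--
--     return dp
-- ===== SOURCE B (Python) =====
-- def full_table(l: list) -> list:
--     """ Computes all possible ranges. """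
--     n = len(l)
--     dp = []
--     for i in range(n):
--         best = i
--         row = [i]
--         for k in range(i + 1, n):
--             if l[k] < l[best]:
--                 best = k
--             row.append(best)
--         dp.append(row)
--     return dp
-- ===== Notes on version B (the rewrite author's own statement) =====
-- stated objective: simpler
-- what changed: Each row is now produced independently by a single left-to-right scan of l maintaining a running argmin (strict < keeps the earlier index on ties), replacing A's length-increasing DP that builds column j of every row from column j-1 of the row and of its right neighbour under break-guarded bounds checks.
import Mathlib
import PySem

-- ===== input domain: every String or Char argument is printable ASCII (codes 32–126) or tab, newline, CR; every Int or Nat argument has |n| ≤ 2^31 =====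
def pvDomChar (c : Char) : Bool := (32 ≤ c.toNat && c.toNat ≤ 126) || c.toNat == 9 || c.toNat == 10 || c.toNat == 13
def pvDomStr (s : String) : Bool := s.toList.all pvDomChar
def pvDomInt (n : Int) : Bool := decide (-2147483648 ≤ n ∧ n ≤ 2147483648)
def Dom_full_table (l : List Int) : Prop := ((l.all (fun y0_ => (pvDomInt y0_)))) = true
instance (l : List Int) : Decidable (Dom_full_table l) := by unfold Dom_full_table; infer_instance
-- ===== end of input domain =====

-- B replaces A's row-combining DP (dp[i][j] built from dp[i][j-1] and dp[i+1][j-1]) by an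
-- independent left-to-right running-argmin scan per row; same O(n^2) cost, simpler code.

-- ===== PORT A =====
-- min(a, b, key=lambda x: l[x]): Python's min returns the FIRST argument on a tie.
def pyMinKey (l : List Int) (a b : Int) : Int :=
  if PySem.List.pyGetD l b 0 < PySem.List.pyGetD l a 0 then b else a

-- inner 'for i in range(n-1)' loop of A, with the 'break' as early return (structural recursion
-- on the remaining index list); dp[i].append(v) is dp.set i (row ++ [v]); the dp[i][j] /
-- dp[i+1][j] reads use getD, exact here because the loop's guard keeps them in range.
def innerA (l : List Int) (n j : Nat) : List Nat → List (List Int) → List (List Int)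
  | [], dp => dp
  | i :: rest, dp =>
      if n ≤ i + j ∨ (dp.getD (i+1) []).length ≤ j then dp
      else innerA l n j rest
        (dp.set i ((dp.getD i []) ++ [pyMinKey l ((dp.getD i []).getD j 0) ((dp.getD (i+1) []).getD j 0)]))

def full_table (l : List Int) : List (List Int) :=
  let n := l.length
  -- dp = [[] for i in range(n)]
  let dp0 : List (List Int) := (List.range n).map (fun _ => [])
  -- for i in range(n): dp[i].append(i)
  let dp1 := (List.range n).foldl (fun dp i => dp.set i ((dp.getD i []) ++ [(i : Int)])) dp0
  -- for j in range(n): for i in range(n-1): …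
  (List.range n).foldl (fun dp j => innerA l n j (List.range (n-1)) dp) dp1

-- ===== PORT B =====
-- one row: best = i; row = [i]; for k in range(i+1, n): if l[k] < l[best]: best = k; row.append(best)
-- (k and best are always in [0, n), so the getD reads of l are exact)
def rowB (l : List Int) (i n : Nat) : List Int :=
  ((List.range' (i+1) (n - (i+1))).foldl
    (fun (st : Nat × List Int) k =>
      let best := if l.getD k 0 < l.getD st.1 0 then k else st.1
      (best, st.2 ++ [(best : Int)]))
    (i, [(i : Int)])).2

def full_table_alt (l : List Int) : List (List Int) :=
  let n := l.length
  (List.range n).foldl (fun dp i => dp ++ [rowB l i n]) []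

-- ===== PRECONDITION & SPEC =====
def Spec_full_table (l : List Int) (out : List (List Int)) : Prop := out = full_table_alt l
instance (l : List Int) (out : List (List Int)) : Decidable (Spec_full_table l out) := by unfold Spec_full_table; infer_instance

-- ===== CLAIM (what is proved, stated in full; the proofs are below) =====
def Claim_equal_full_table : Prop := ∀ (l : List Int), Dom_full_table l → Spec_full_table l (full_table l)

-- ===== LEMMAS AND PROOFS =====

-- value of l at position k (all positions used are in range)
def gV (l : List Int) (k : Nat) : Int := l.getD k 0

-- first argmin index of the window l[i..i+j] (ties go to the smaller index)
def fam (l : List Int) (i : Nat) : Nat → Nat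
  | 0 => i
  | j+1 => if gV l (i+j+1) < gV l (fam l i j) then i+j+1 else fam l i j

-- row i of the table, truncated to its first m entries
def rowT (l : List Int) (i m : Nat) : List Int :=
  (List.range m).map (fun j => ((fam l i j : Nat) : Int))

-- A's dp during outer step t: rows < s already extended by this step, rows ≥ s not yet
def mixT (l : List Int) (n t s : Nat) : List (List Int) :=
  (List.range n).map (fun i => rowT l i (if i < s then min (t+2) (n-i) else min (t+1) (n-i)))

-- combinatorial core: first-wins min of the argmins of two adjacent windows = extending the left one
lemma minkey_step (v : Nat → Int) (a b c d : Nat)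
    (hIH : (if v b < v a then b else a) = (if v c < v a then c else a)) :
    (if v (if v d < v b then d else b) < v (if v c < v a then c else a)
       then (if v d < v b then d else b) else (if v c < v a then c else a))
    = (if v d < v (if v c < v a then c else a) then d
       else (if v c < v a then c else a)) := by
  split_ifs at hIH ⊢ <;> subst_vars <;> first | rfl | omega

lemma crux (l : List Int) (i j : Nat) :
    (if gV l (fam l (i+1) j) < gV l (fam l i j) then fam l (i+1) j else fam l i j)
      = fam l i (j+1) := by
  induction j generalizing i with
  | zero => simp [fam]
  | succ j ih =>
    have hIH := ih i
    have e1 : fam l (i+1) (j+1) = if gV l (i+j+2) < gV l (fam l (i+1) j) then i+j+2 else fam l (i+1) j := by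
      have : (i+1)+j+1 = i+j+2 := by omega
      rw [fam, this]
    have e2 : fam l i (j+1) = if gV l (i+j+1) < gV l (fam l i j) then i+j+1 else fam l i j := rfl
    have e3 : fam l i (j+2) = if gV l (i+j+2) < gV l (fam l i (j+1)) then i+j+2 else fam l i (j+1) := by
      have : i+(j+1)+1 = i+j+2 := by omega
      rw [fam, this]
    rw [e1, e3, e2] at *
    exact minkey_step (gV l) (fam l i j) (fam l (i+1) j) (i+j+1) (i+j+2) hIH

lemma rowT_succ (l : List Int) (i m : Nat) :
    rowT l i (m+1) = rowT l i m ++ [((fam l i m : Nat) : Int)] := by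
  simp [rowT, List.range_succ]

lemma rowT_length (l : List Int) (i m : Nat) : (rowT l i m).length = m := by
  simp [rowT]

lemma getD_map_range' {α : Type} (f : Nat → α) (n i : Nat) (d : α) (h : i < n) :
    ((List.range n).map f).getD i d = f i := by
  simp [List.getD, h]

lemma rowT_getD (l : List Int) (i m j : Nat) (h : j < m) :
    (rowT l i m).getD j 0 = ((fam l i j : Nat) : Int) := by
  rw [rowT, getD_map_range' _ m j _ h]

lemma set_map_range {α : Type} (f : Nat → α) (n s : Nat) (v : α) :
    ((List.range n).map f).set s v
      = (List.range n).map (fun i => if i = s then v else f i) := by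
  apply List.ext_getElem <;> simp
  intro i hi
  rw [List.getElem_set]
  simp [eq_comm]

lemma map_range_congr {α : Type} (f g : Nat → α) (n : Nat) (h : ∀ i, i < n → f i = g i) :
    (List.range n).map f = (List.range n).map g :=
  List.map_congr_left (fun i hi => h i (List.mem_range.mp hi))

-- one full pass of the inner loop, from row s on, turns the mixed state into the step-t+1 state
lemma innerA_eq (l : List Int) (n t : Nat) : ∀ (m s : Nat), s + m = n - 1 →
    innerA l n t (List.range' s m) (mixT l n t s)
      = (List.range n).map (fun i => rowT l i (min (t+2) (n-i))) := by
  intro m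
  induction m with
  | zero =>
    intro s hs
    rw [List.range'_zero, innerA, mixT]
    apply map_range_congr
    intro i hi
    by_cases h1 : i < s
    · simp [h1]
    · simp only [h1, if_false]
      have : min (t+1) (n-i) = min (t+2) (n-i) := by omega
      rw [this]
  | succ m ih =>
    intro s hs
    have hsn : s + 1 < n := by omega
    have hget1 : (mixT l n t s).getD (s+1) [] = rowT l (s+1) (min (t+1) (n-(s+1))) := by
      rw [mixT, getD_map_range' _ n (s+1) _ hsn]
      simp
    rw [List.range'_succ, innerA, hget1, rowT_length]
    by_cases hg : n - 1 - s ≤ t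
    · rw [if_pos (by omega)]
      apply map_range_congr
      intro i hi
      by_cases h1 : i < s
      · simp [h1]
      · simp only [h1, if_false]
        have : min (t+1) (n-i) = min (t+2) (n-i) := by omega
        rw [this]
    · rw [if_neg (by omega)]
      have hrow : (mixT l n t s).getD s [] = rowT l s (t+1) := by
        rw [mixT, getD_map_range' _ n s _ (by omega)]
        have : (if s < s then min (t+2) (n-s) else min (t+1) (n-s)) = t+1 := by
          simp; omega
        rw [this]
      have hkey : pyMinKey l ((rowT l s (t+1)).getD t 0)
            ((rowT l (s+1) (min (t+1) (n-(s+1)))).getD t 0) = ((fam l s (t+1) : Nat) : Int) := by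
        rw [rowT_getD _ _ _ _ (by omega), rowT_getD _ _ _ _ (by omega)]
        rw [pyMinKey]
        simp only [PySem.List.pyGetD_natCast]
        rw [← apply_ite (fun (k : Nat) => ((k : Nat) : Int))]
        exact congrArg _ (crux l s t)
      rw [hrow, hkey, ← rowT_succ]
      have hset : (mixT l n t s).set s (rowT l s (t+1+1)) = mixT l n t (s+1) := by
        rw [mixT, set_map_range, mixT]
        apply map_range_congr
        intro i hi
        by_cases h1 : i = s
        · subst h1
          simp only [Nat.lt_succ_self, if_pos]
          have : min (t+2) (n-i) = t+1+1 := by omega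
          rw [this]
        · have : (i < s+1) = (i < s) := by
            apply propext; omega
          simp [h1, this]
      rw [hset]
      exact ih (s+1) (by omega)

lemma outer_eq (l : List Int) (n : Nat) : ∀ (t : Nat), t ≤ n →
    (List.range t).foldl (fun dp j => innerA l n j (List.range (n-1)) dp)
        ((List.range n).map (fun i => rowT l i (min 1 (n-i))))
      = (List.range n).map (fun i => rowT l i (min (t+1) (n-i))) := by
  intro t
  induction t with
  | zero => intro _; rfl
  | succ t ih =>
    intro ht
    rw [List.range_succ, List.foldl_append, ih (by omega)]
    simp only [List.foldl_cons, List.foldl_nil]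
    have hmix : (List.range n).map (fun i => rowT l i (min (t+1) (n-i))) = mixT l n t 0 := by
      rw [mixT]
      apply map_range_congr
      intro i hi
      simp
    rw [hmix, List.range_eq_range', innerA_eq l n t (n-1) 0 (by omega)]

lemma init_eq (n : Nat) : ∀ (k : Nat), k ≤ n →
    (List.range k).foldl (fun dp i => dp.set i ((dp.getD i []) ++ [(i : Int)]))
        ((List.range n).map (fun _ => ([] : List Int)))
      = (List.range n).map (fun i => if i < k then [(i : Int)] else []) := by
  intro k
  induction k with
  | zero => intro _; simp
  | succ k ih =>
    intro hk
    rw [List.range_succ, List.foldl_append, ih (by omega)]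
    simp only [List.foldl_cons, List.foldl_nil]
    rw [getD_map_range' _ n k _ (by omega), set_map_range]
    apply map_range_congr
    intro i hi
    by_cases h1 : i = k <;> by_cases h2 : i < k <;> simp [h1, h2] <;> omega

-- B's scan of row i, started after position i+1+j with the running state for window length j
lemma rowB_go (l : List Int) (i : Nat) : ∀ (m j : Nat),
    ((List.range' (i+1+j) m).foldl
      (fun (st : Nat × List Int) k =>
        let best := if l.getD k 0 < l.getD st.1 0 then k else st.1
        (best, st.2 ++ [(best : Int)]))
      (fam l i j, rowT l i (j+1))).2 = rowT l i (j+1+m) := by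
  intro m
  induction m with
  | zero => intro j; rfl
  | succ m ih =>
    intro j
    rw [List.range'_succ, List.foldl_cons]
    rw [show i+1+j = i+j+1 from by omega]
    show (List.foldl _ (fam l i (j+1), rowT l i (j+1) ++ [((fam l i (j+1) : Nat) : Int)])
      (List.range' (i+j+1+1) m)).2 = rowT l i (j+1+(m+1))
    rw [← rowT_succ, show i+j+1+1 = i+1+(j+1) from by omega, ih (j+1),
        show j+1+1+m = j+1+(m+1) from by omega]

lemma rowB_eq (l : List Int) (i n : Nat) (h : i < n) :
    rowB l i n = rowT l i (n - i) := by
  unfold rowB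
  show (List.foldl _ (fam l i 0, rowT l i (0+1)) (List.range' (i+1+0) (n-(i+1)))).2 = rowT l i (n-i)
  rw [rowB_go l i (n-(i+1)) 0, show 0+1+(n-(i+1)) = n-i from by omega]

-- ===== VERDICT (by name: the statement is the Claim_ definition above) =====
theorem full_table_spec : Claim_equal_full_table := by
  intro l _
  show (List.range l.length).foldl (fun dp j => innerA l l.length j (List.range (l.length-1)) dp)
      ((List.range l.length).foldl (fun dp i => dp.set i ((dp.getD i []) ++ [(i : Int)]))
        ((List.range l.length).map (fun _ => [])))
    = (List.range l.length).foldl (fun dp i => dp ++ [rowB l i l.length]) []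
  rw [init_eq l.length l.length (le_refl _)]
  have h1 : (List.range l.length).map (fun i => if i < l.length then [(i : Int)] else ([] : List Int))
      = (List.range l.length).map (fun i => rowT l i (min 1 (l.length - i))) := by
    apply map_range_congr
    intro i hi
    rw [if_pos hi, show min 1 (l.length - i) = 1 from by omega]
    simp [rowT, fam]
  rw [h1, outer_eq l l.length l.length (le_refl _),
      PySem.List.foldl_append_singleton_eq_map (fun i => rowB l i l.length) (List.range l.length) []]
  simp only [List.nil_append]
  apply map_range_congr
  intro i hi
  rw [rowB_eq l i l.length hi, show min (l.length+1) (l.length - i) = l.length - i from by omega]
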